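-- pv_equiv track=rewrite | github.com/Vsisk/after_work | billing_dsl_agent/services/validator.py | _extract_call_contents
-- ===== SOURCE A (Python) =====
-- def _extract_call_contents(expression: str, name: str) -> list[str]:
--     """Extract the inner text of named function calls with balanced parentheses."""
--
--     pattern = f"{name}("
--     contents: list[str] = []
--     search_start = 0
--     while True:
--         start = expression.find(pattern, search_start)
--         if start < 0:
--             return contents
--         idx = start + len(pattern)
--         depth = 1
--         chunk_start = idx
--         while idx < len(expression) and depth > 0:
--             char = expression[idx]
--             if char == "(":
--                 depth += 1
--             elif char == ")":
--                 depth -= 1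
--             idx += 1
--         if depth == 0:
--             contents.append(expression[chunk_start : idx - 1])
--             search_start = idx
--         else:
--             contents.append(expression[chunk_start:])
--             return contents
-- ===== SOURCE B (Python) =====
-- def _extract_call_contents(expression: str, name: str) -> list[str]:
--     """Precompute a paren match map with one stack pass, then jump per occurrence by lookup."""
--     pattern = f"{name}("
--     match_of: dict[int, int] = {}
--     stack: list[int] = []
--     for i, ch in enumerate(expression):
--         if ch == "(":
--             stack.append(i)
--         elif ch == ")" and stack:
--             match_of[stack.pop()] = i
--     contents: list[str] = []
--     search_start = 0
--     while True:
--         pos = expression.find(pattern, search_start)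
--         if pos < 0:
--             return contents
--         inner_start = pos + len(pattern)
--         close = match_of.get(inner_start - 1)
--         if close is None:
--             contents.append(expression[inner_start:])
--             return contents
--         contents.append(expression[inner_start:close])
--         search_start = close + 1
-- ===== Notes on version B (the rewrite author's own statement) =====
-- stated objective: alternative
-- what changed: B precomputes the matching-parenthesis map for the whole string in one stack pass and then, per occurrence of 'name(', jumps straight to the closing paren by dictionary lookup, eliminating A's per-occurrence depth-counting walk.
import Mathlib
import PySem

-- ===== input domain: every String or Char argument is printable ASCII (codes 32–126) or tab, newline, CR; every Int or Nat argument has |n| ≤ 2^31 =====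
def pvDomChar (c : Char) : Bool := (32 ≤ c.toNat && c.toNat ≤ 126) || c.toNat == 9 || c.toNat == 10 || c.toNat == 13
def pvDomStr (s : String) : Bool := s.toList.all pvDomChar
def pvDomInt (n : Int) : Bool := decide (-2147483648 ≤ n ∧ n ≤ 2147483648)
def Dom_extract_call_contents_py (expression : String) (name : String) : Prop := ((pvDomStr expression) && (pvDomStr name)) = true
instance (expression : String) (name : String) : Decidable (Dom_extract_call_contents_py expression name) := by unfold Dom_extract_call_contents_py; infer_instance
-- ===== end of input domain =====

-- B replaces A's per-occurrence depth-counting walk by a single stack pass that precomputes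
-- the matching-parenthesis map, each occurrence then jumping to its close by dictionary lookup;
-- objective: alternative algorithm (stack-based paren matching + lookup instead of repeated walks).
-- Loops are ported as structural recursion on a fuel parameter; every call site passes
-- fuel that provably suffices (each iteration advances the index, bounded by the length).

-- ===== PORT A =====
-- A's inner while loop: `while idx < len(expression) and depth > 0: …`, final (idx, depth)
def innerA (s : List Char) : Nat → Nat → Int → Nat × Int
  | 0, idx, depth => (idx, depth)
  | fuel + 1, idx, depth =>
    if h : idx < s.length ∧ 0 < depth then
      if s[idx]'h.1 = '(' then innerA s fuel (idx + 1) (depth + 1)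
      else if s[idx]'h.1 = ')' then innerA s fuel (idx + 1) (depth - 1)
      else innerA s fuel (idx + 1) depth
    else (idx, depth)

-- A's outer `while True` loop (one fuel unit per found occurrence; len+1 always suffices)
def loopA (s p : List Char) : Nat → Nat → List (List Char) → List (List Char)
  | 0, _, contents => contents
  | fuel + 1, searchStart, contents =>
    if PySem.Chars.findFrom s p (searchStart : Int) none < 0 then contents
    else
      if (innerA s s.length
            ((PySem.Chars.findFrom s p (searchStart : Int) none).toNat + p.length) 1).2 = 0 then
        loopA s p fuel
          (innerA s s.length
            ((PySem.Chars.findFrom s p (searchStart : Int) none).toNat + p.length) 1).1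
          (contents ++ [PySem.List.slice s
            (some (((PySem.Chars.findFrom s p (searchStart : Int) none).toNat + p.length : Nat) : Int))
            (some (((innerA s s.length
              ((PySem.Chars.findFrom s p (searchStart : Int) none).toNat + p.length) 1).1 : Int) - 1))])
      else contents ++ [PySem.List.slice s
        (some (((PySem.Chars.findFrom s p (searchStart : Int) none).toNat + p.length : Nat) : Int)) none]

def extract_call_contents_py (expression : String) (name : String) : List String :=
  (loopA expression.toList (name.toList ++ ['(']) (expression.toList.length + 1) 0 []).map
    String.ofList

-- ===== PORT B =====
-- Source B's `for i, ch in enumerate(expression)` building the match map: recursion over the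
-- characters with the running index i; the stack is kept top-first (Python appends/pops at
-- the end; a cons/head list is the same LIFO discipline).
def mgo (s : List Char) : List Char → Nat → List Nat → PySem.Dict Nat Nat → PySem.Dict Nat Nat
  | [], _, _, d => d
  | c :: rest, i, stack, d =>
    if c = '(' then mgo s rest (i + 1) (i :: stack) d
    else if c = ')' then
      match stack with
      | [] => mgo s rest (i + 1) [] d
      | j :: tl => mgo s rest (i + 1) tl (d.insert j i)
    else mgo s rest (i + 1) stack d

def buildMatch (s : List Char) : PySem.Dict Nat Nat := mgo s s 0 [] PySem.Dict.empty

-- Source B's `while True` loop: find the next occurrence, look its open paren up in the map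
def loopB (s p : List Char) (m : PySem.Dict Nat Nat) : Nat → Nat → List (List Char) → List (List Char)
  | 0, _, contents => contents
  | fuel + 1, searchStart, contents =>
    if PySem.Chars.findFrom s p (searchStart : Int) none < 0 then contents
    else
      match m.get? ((PySem.Chars.findFrom s p (searchStart : Int) none).toNat + p.length - 1) with
      | none => contents ++ [PySem.List.slice s
          (some (((PySem.Chars.findFrom s p (searchStart : Int) none).toNat + p.length : Nat) : Int)) none]
      | some close =>
        loopB s p m fuel (close + 1)
          (contents ++ [PySem.List.slice s
            (some (((PySem.Chars.findFrom s p (searchStart : Int) none).toNat + p.length : Nat) : Int))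
            (some ((close : Nat) : Int))])

def extract_call_contents_py_alt (expression : String) (name : String) : List String :=
  (loopB expression.toList (name.toList ++ ['(']) (buildMatch expression.toList)
    (expression.toList.length + 1) 0 []).map String.ofList

-- ===== PRECONDITION & SPEC =====
def Spec_extract_call_contents_py (expression : String) (name : String) (out : List String) : Prop := out = extract_call_contents_py_alt expression name
instance (expression : String) (name : String) (out : List String) : Decidable (Spec_extract_call_contents_py expression name out) := by unfold Spec_extract_call_contents_py; infer_instance

-- ===== CLAIM (what is proved, stated in full; the proofs are below) =====
def Claim_equal_extract_call_contents_py : Prop := ∀ (expression : String) (name : String), Dom_extract_call_contents_py expression name → Spec_extract_call_contents_py expression name (extract_call_contents_py expression name)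

-- ===== LEMMAS AND PROOFS =====

-- basic facts about A's inner walk
theorem innerA_ge (s : List Char) : ∀ (F i : Nat) (d : Int), i ≤ (innerA s F i d).1 := by
  intro F
  induction F with
  | zero => intro i d; exact Nat.le_refl i
  | succ F ih =>
    intro i d
    rw [innerA]
    split_ifs with h h1 h2
    · have := ih (i + 1) (d + 1); omega
    · have := ih (i + 1) (d - 1); omega
    · have := ih (i + 1) d; omega
    · exact Nat.le_refl i

theorem innerA_le (s : List Char) : ∀ (F i : Nat) (d : Int), i ≤ s.length →
    (innerA s F i d).1 ≤ s.length := by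
  intro F
  induction F with
  | zero => intro i d h; exact h
  | succ F ih =>
    intro i d h
    rw [innerA]
    split_ifs with hc h1 h2
    · exact ih (i + 1) (d + 1) (by omega)
    · exact ih (i + 1) (d - 1) (by omega)
    · exact ih (i + 1) d (by omega)
    · exact h

theorem innerA_step (s : List Char) : ∀ (F i : Nat) (d : Int), 0 < d →
    (innerA s F i d).2 = 0 → i < (innerA s F i d).1 := by
  intro F
  induction F with
  | zero => intro i d hd h0; exfalso; rw [innerA] at h0; omega
  | succ F ih =>
    intro i d hd h0
    rw [innerA] at h0 ⊢
    split_ifs at h0 ⊢ with hc h1 h2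
    · have := ih (i + 1) (d + 1) (by omega) h0; omega
    · have := innerA_ge s F (i + 1) (d - 1); omega
    · have := ih (i + 1) d hd h0; omega
    · exfalso; omega

-- a stopped walk (index out of range or non-positive depth) is the identity, any fuel
theorem innerA_id (s : List Char) (F i : Nat) (d : Int) (h : ¬ (i < s.length ∧ 0 < d)) :
    innerA s F i d = (i, d) := by
  cases F with
  | zero => rw [innerA]
  | succ F => rw [innerA, dif_neg h]

-- the walk's result does not depend on the fuel, as long as it suffices
theorem innerA_fuel (s : List Char) : ∀ (F F' i : Nat) (d : Int),
    s.length - i ≤ F → s.length - i ≤ F' → innerA s F i d = innerA s F' i d := by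
  intro F
  induction F with
  | zero =>
    intro F' i d h1 h2
    rw [innerA_id s 0 i d (by omega), innerA_id s F' i d (by omega)]
  | succ F ih =>
    intro F' i d h1 h2
    match F' with
    | 0 => rw [innerA_id s _ i d (by omega), innerA_id s 0 i d (by omega)]
    | F'' + 1 =>
      rw [innerA, innerA]
      split_ifs with h hc1 hc2
      · exact ih F'' (i + 1) (d + 1) (by omega) (by omega)
      · exact ih F'' (i + 1) (d - 1) (by omega) (by omega)
      · exact ih F'' (i + 1) d (by omega) (by omega)
      · rfl

-- reading off head/index/tail facts from `c :: rest = s.drop i`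
theorem pv_drop_cons (s : List Char) (i : Nat) (c : Char) (rest : List Char)
    (hr : c :: rest = s.drop i) :
    i < s.length ∧ s[i]? = some c ∧ rest = s.drop (i + 1) := by
  have hlen : i < s.length := by
    have := congrArg List.length hr; simp at this; omega
  refine ⟨hlen, ?_, ?_⟩
  · have h1 : (s.drop i)[0]? = s[i + 0]? := List.getElem?_drop
    rw [← hr] at h1
    simpa using h1.symm
  · have ht : (s.drop i).tail = s.drop (i + 1) := List.tail_drop
    rw [← ht, ← hr]
    rfl

-- positions never in the stack and below the scan point are never (re)inserted
theorem mgo_not_mem (s : List Char) : ∀ (r : List Char) (i : Nat) (stack : List Nat)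
    (d : PySem.Dict Nat Nat) (j : Nat), j < i → j ∉ stack →
    (mgo s r i stack d).get? j = d.get? j := by
  intro r
  induction r with
  | nil => intro i stack d j _ _; simp only [mgo]
  | cons c rest ih =>
    intro i stack d j hji hjs
    by_cases h1 : c = '('
    · simp only [mgo, if_pos h1]
      exact ih (i + 1) (i :: stack) d j (by omega)
        (by simp only [List.mem_cons]; push_neg; exact ⟨by omega, hjs⟩)
    · by_cases h2 : c = ')'
      · match stack, hjs with
        | [], _ =>
          simp only [mgo, if_neg h1, if_pos h2]
          exact ih (i + 1) [] d j (by omega) (by simp)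
        | a :: tl, hjs =>
          simp only [mgo, if_neg h1, if_pos h2]
          rw [ih (i + 1) tl (d.insert a i) j (by omega)
            (fun h => hjs (List.mem_cons_of_mem a h))]
          exact PySem.Dict.get?_insert_of_ne d i (fun h => hjs (h ▸ List.mem_cons_self))
      · simp only [mgo, if_neg h1, if_neg h2]
        exact ih (i + 1) stack d j (by omega) hjs

-- the crux: a stack entry j at depth (pre.length + 1) ends up mapped to exactly the close
-- that A's depth walk from the current position finds (or stays unmapped if the walk fails)
theorem mgo_mem (s : List Char) : ∀ (r : List Char) (i : Nat) (pre st : List Nat)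
    (d : PySem.Dict Nat Nat) (j : Nat), r = s.drop i → j < i → j ∉ pre → j ∉ st →
    (mgo s r i (pre ++ j :: st) d).get? j =
      if (innerA s (s.length - i) i ((pre.length : Int) + 1)).2 = 0
      then some ((innerA s (s.length - i) i ((pre.length : Int) + 1)).1 - 1)
      else d.get? j := by
  intro r
  induction r with
  | nil =>
    intro i pre st d j hr hji hjp hjs
    have hlen : s.length ≤ i := by
      have := congrArg List.length hr
      simp only [List.length_drop, List.length_nil] at this
      omega
    rw [innerA_id s _ i _ (by omega)]
    simp only [mgo]
    rw [if_neg (by intro hcontra; omega)]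
  | cons c rest ih =>
    intro i pre st d j hr hji hjp hjs
    obtain ⟨hlt, hsome, hrest⟩ := pv_drop_cons s i c rest hr
    have hsi : s[i]'hlt = c := by
      rw [List.getElem?_eq_getElem hlt] at hsome
      exact Option.some.inj hsome
    have hfuel : s.length - i = (s.length - (i + 1)) + 1 := by omega
    rw [hfuel, innerA, dif_pos (⟨hlt, by positivity⟩ : i < s.length ∧ (0:Int) < (pre.length : Int) + 1)]
    simp only [hsi]
    by_cases h1 : c = '('
    · rw [if_pos h1]
      simp only [mgo, if_pos h1]
      rw [show i :: (pre ++ j :: st) = (i :: pre) ++ j :: st from rfl,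
        ih (i + 1) (i :: pre) st d j hrest (by omega)
          (by simp only [List.mem_cons]; push_neg; exact ⟨by omega, hjp⟩) hjs]
      have hcast : (((i :: pre).length : Int) + 1) = (pre.length : Int) + 1 + 1 := by
        simp only [List.length_cons]; push_cast; ring
      rw [hcast]
    · rw [if_neg h1]
      by_cases h2 : c = ')'
      · rw [if_pos h2]
        match pre, hjp with
        | [], _ =>
          simp only [List.nil_append, mgo, if_neg h1, if_pos h2]
          rw [show ((([] : List Nat).length : Int) + 1 - 1) = 0 by simp,
            innerA_id s _ (i + 1) 0 (by omega)]
          rw [if_pos rfl]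
          rw [mgo_not_mem s rest (i + 1) st (d.insert j i) j (by omega) hjs]
          rw [PySem.Dict.get?_insert_self]
          simp
        | a :: pre', hjp =>
          have hja : j ≠ a := by intro h; exact hjp (h ▸ List.mem_cons_self)
          have hjp' : j ∉ pre' := fun h => hjp (List.mem_cons_of_mem a h)
          simp only [List.cons_append, mgo, if_neg h1, if_pos h2]
          rw [ih (i + 1) pre' st (d.insert a i) j hrest (by omega) hjp' hjs]
          have hcast : ((a :: pre').length : Int) + 1 - 1 = (pre'.length : Int) + 1 := by
            simp only [List.length_cons]; push_cast; ring
          rw [hcast, PySem.Dict.get?_insert_of_ne d i hja]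
      · rw [if_neg h2]
        simp only [mgo, if_neg h1, if_neg h2]
        exact ih (i + 1) pre st d j hrest (by omega) hjp hjs

-- processing from i with only positions < i on the stack: a later '(' at q gets exactly
-- A's walk result (or no entry at all)
theorem mgo_future (s : List Char) : ∀ (r : List Char) (i : Nat) (stack : List Nat)
    (d : PySem.Dict Nat Nat) (q : Nat), r = s.drop i → (∀ x ∈ stack, x < i) →
    i ≤ q → (hq : q < s.length) → s[q]'hq = '(' → d.get? q = none →
    (mgo s r i stack d).get? q =
      if (innerA s s.length (q + 1) 1).2 = 0
      then some ((innerA s s.length (q + 1) 1).1 - 1)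
      else none := by
  intro r
  induction r with
  | nil =>
    intro i stack d q hr hst hiq hq hsq hd
    exfalso
    have := congrArg List.length hr
    simp only [List.length_drop, List.length_nil] at this
    omega
  | cons c rest ih =>
    intro i stack d q hr hst hiq hq hsq hd
    obtain ⟨hlt, hsome, hrest⟩ := pv_drop_cons s i c rest hr
    have hsi : s[i]'hlt = c := by
      rw [List.getElem?_eq_getElem hlt] at hsome
      exact Option.some.inj hsome
    by_cases hieq : i = q
    · -- entering position q: it is '(' and is pushed with empty prefix above it
      subst hieq
      have hci : c = '(' := by rw [← hsi]; exact hsq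
      simp only [mgo, if_pos hci]
      have hqs : i ∉ stack := fun h => absurd (hst i h) (by omega)
      have hm := mgo_mem s rest (i + 1) [] stack d i hrest (by omega) (by simp) hqs
      simp only [List.nil_append] at hm
      rw [hm]
      rw [innerA_fuel s (s.length - (i + 1)) s.length (i + 1)
        ((([] : List Nat).length : Int) + 1) (by omega) (by omega)]
      simp only [List.length_nil, Nat.cast_zero, zero_add]
      split_ifs with h
      · rfl
      · exact hd
    · -- i < q: step on, keeping the invariants
      have hiq' : i + 1 ≤ q := by omega
      by_cases h1 : c = '('
      · simp only [mgo, if_pos h1]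
        exact ih (i + 1) (i :: stack) d q hrest
          (by intro x hx
              rcases List.mem_cons.mp hx with h | h
              · omega
              · have := hst x h; omega)
          hiq' hq hsq hd
      · by_cases h2 : c = ')'
        · match stack with
          | [] =>
            simp only [mgo, if_neg h1, if_pos h2]
            exact ih (i + 1) [] d q hrest (by simp) hiq' hq hsq hd
          | a :: tl =>
            simp only [mgo, if_neg h1, if_pos h2]
            refine ih (i + 1) tl (d.insert a i) q hrest
              (by intro x hx; have := hst x (List.mem_cons_of_mem a hx); omega) hiq' hq hsq ?_
            rw [PySem.Dict.get?_insert_of_ne d i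
              (by have := hst a List.mem_cons_self; omega), hd]
        · simp only [mgo, if_neg h1, if_neg h2]
          exact ih (i + 1) stack d q hrest (by intro x hx; have := hst x hx; omega) hiq' hq hsq hd

-- the match map answers exactly A's depth walk for any '(' in s
theorem buildMatch_get (s : List Char) (q : Nat) (hq : q < s.length) (hsq : s[q]'hq = '(') :
    (buildMatch s).get? q =
      if (innerA s s.length (q + 1) 1).2 = 0
      then some ((innerA s s.length (q + 1) 1).1 - 1)
      else none := by
  unfold buildMatch
  exact mgo_future s s 0 [] PySem.Dict.empty q (by simp) (by simp) (Nat.zero_le q) hq hsq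
    (PySem.Dict.get?_empty q)

-- bounds on a successful find, used at each loop step
theorem loopA_aux (s p : List Char) (k : Nat) (h : k ≤ s.length)
    (hstart : ¬ PySem.Chars.findFrom s p (k : Int) none < 0) :
    (k : Int) ≤ PySem.Chars.findFrom s p (k : Int) none ∧
      (PySem.Chars.findFrom s p (k : Int) none).toNat + p.length ≤ s.length := by
  have hne : PySem.Chars.findFrom s p (k : Int) none ≠ -1 := by omega
  obtain ⟨h1, h2, h3⟩ := PySem.Chars.findFrom_natCast_spec s p k h hne
  have hp := h2.length_le
  rw [List.length_drop] at hp
  have h4 : PySem.Chars.findFrom s p (k : Int) none ≤ (s.length : Int) := by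
    rw [PySem.Chars.findFrom_natCast s p k h]
    have hf := PySem.Chars.find_le_length (s.drop k) p
    rw [List.length_drop] at hf
    split_ifs <;> omega
  exact ⟨h1, by omega⟩

-- the two loops agree step by step: a map lookup is exactly A's inner walk
theorem loopA_eq_loopB (s p0 : List Char) :
    ∀ (F k : Nat) (acc : List (List Char)), k ≤ s.length →
      loopA s (p0 ++ ['(']) F k acc = loopB s (p0 ++ ['(']) (buildMatch s) F k acc := by
  intro F
  induction F with
  | zero => intro k acc hk; rw [loopA, loopB]
  | succ F ih =>
    intro k acc hk
    set p := p0 ++ ['('] with hp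
    by_cases hstart : PySem.Chars.findFrom s p (k : Int) none < 0
    · rw [loopA, loopB, if_pos hstart, if_pos hstart]
    · have ha := loopA_aux s p k hk hstart
      have spec := PySem.Chars.findFrom_natCast_spec s p k hk (by omega)
      set pos := (PySem.Chars.findFrom s p (k : Int) none).toNat with hpos
      have hplen : p.length = p0.length + 1 := by simp [hp]
      have hq : pos + p.length - 1 < s.length := by omega
      -- the char right before the inner start is the pattern's final '('
      have hchar : s[pos + p.length - 1]'hq = '(' := by
        have hpref := spec.2.1
        have hlen : p.length - 1 < (s.drop pos).length := by
          rw [List.length_drop]; omega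
        have := hpref.getElem (i := p.length - 1) (by omega)
        rw [List.getElem_drop] at this
        have hidx : p[p.length - 1]'(by omega) = '(' := by
          have : p[p0.length]'(by omega) = '(' := by
            simp [hp]
          simpa [hplen] using this
        rw [hidx] at this
        have harith : pos + (p.length - 1) = pos + p.length - 1 := by omega
        simp only [harith] at this
        exact this.symm
      rw [loopA, loopB, if_neg hstart, if_neg hstart]
      rw [buildMatch_get s (pos + p.length - 1) hq hchar]
      have hq1 : pos + p.length - 1 + 1 = pos + p.length := by omega
      rw [hq1]
      by_cases hdep : (innerA s s.length (pos + p.length) 1).2 = 0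
      · rw [if_pos hdep, if_pos hdep]
        set idx := (innerA s s.length (pos + p.length) 1).1 with hidx
        have hstep : pos + p.length < idx := innerA_step s s.length (pos + p.length) 1
          (by norm_num) hdep
        have hle : idx ≤ s.length := innerA_le s s.length (pos + p.length) 1 (by omega)
        have hcast : ((idx - 1 : Nat) : Int) = (idx : Int) - 1 := by omega
        have hsub : idx - 1 + 1 = idx := by omega
        simp only [hcast, hsub]
        exact ih idx _ hle
      · rw [if_neg hdep, if_neg hdep]

-- ===== VERDICT (by name: the statement is the Claim_ definition above) =====
theorem extract_call_contents_py_spec : Claim_equal_extract_call_contents_py := by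
  intro expression name _
  unfold Spec_extract_call_contents_py extract_call_contents_py extract_call_contents_py_alt
  rw [loopA_eq_loopB expression.toList name.toList (expression.toList.length + 1) 0 []
    (Nat.zero_le _)]
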